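-- pv_equiv track=rewrite | github.com/GGamangCoder/SWEA | BF_Greedy/4366/4366.py | triVal
-- ===== SOURCE A (Python) =====
-- def triVal(lst):
--     ans = 0
--     l = len(lst)
--     idx = 0
--     for i in range(l-1, -1, -1):
--         ans += 3**idx * lst[i]
--         idx += 1
--     return ans
-- ===== SOURCE B (Python) =====
-- def triVal(lst):
--     ans = 0
--     for x in lst:
--         ans = ans * 3 + x
--     return ans
-- ===== Notes on version B (the rewrite author's own statement) =====
-- stated objective: faster
-- what changed: Replaced the reversed-index loop that recomputes 3**idx with a single forward Horner pass ans = ans*3 + x.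
import Mathlib
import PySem

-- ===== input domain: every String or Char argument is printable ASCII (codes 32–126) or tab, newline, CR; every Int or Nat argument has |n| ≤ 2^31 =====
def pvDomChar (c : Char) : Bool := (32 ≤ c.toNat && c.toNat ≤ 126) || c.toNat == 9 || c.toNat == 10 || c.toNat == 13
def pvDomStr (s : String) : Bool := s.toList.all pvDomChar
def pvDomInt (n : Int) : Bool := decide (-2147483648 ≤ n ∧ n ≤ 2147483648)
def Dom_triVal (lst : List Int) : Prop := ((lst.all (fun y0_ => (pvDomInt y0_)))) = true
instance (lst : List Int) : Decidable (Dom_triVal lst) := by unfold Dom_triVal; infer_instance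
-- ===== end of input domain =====

-- B replaces A's reversed-index loop (with a fresh power 3**idx each step) by a single
-- forward Horner pass; same return value, proved equal below.

-- ===== PORT A =====
-- ans = 0; idx = 0; for i in range(l-1, -1, -1): ans += 3**idx * lst[i]; idx += 1
def triVal (lst : List Int) : Int :=
  ((PySem.List.pyRange ((lst.length : Int) - 1) (-1) (-1)).foldl
      (fun (s : Int × Nat) i => (s.1 + 3 ^ s.2 * PySem.List.pyGetD lst i 0, s.2 + 1))
      (0, 0)).1

-- ===== PORT B =====
-- ans = 0; for x in lst: ans = ans * 3 + x
def triVal_alt (lst : List Int) : Int :=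
  lst.foldl (fun ans x => ans * 3 + x) 0

-- ===== PRECONDITION & SPEC =====
def Spec_triVal (lst : List Int) (out : Int) : Prop := out = triVal_alt lst
instance (lst : List Int) (out : Int) : Decidable (Spec_triVal lst out) := by unfold Spec_triVal; infer_instance

-- ===== CLAIM (what is proved, stated in full; the proofs are below) =====
def Claim_equal_triVal : Prop := ∀ (lst : List Int), Dom_triVal lst → Spec_triVal lst (triVal lst)

-- ===== LEMMAS AND PROOFS =====

-- A's loop, from an arbitrary accumulator (a, k), adds 3^k times the base-3 value of lst.
theorem triVal_loop (lst : List Int) : ∀ (a : Int) (k : Nat),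
    ((PySem.List.pyRange ((lst.length : Int) - 1) (-1) (-1)).foldl
        (fun (s : Int × Nat) i => (s.1 + 3 ^ s.2 * PySem.List.pyGetD lst i 0, s.2 + 1))
        (a, k)).1
      = a + 3 ^ k * triVal_alt lst := by
  induction lst using List.reverseRecOn with
  | nil =>
      intro a k
      rw [PySem.List.pyRange_neg_one_eq_nil (by simp)]
      simp [triVal_alt]
  | append_singleton M y ih =>
      intro a k
      have hm : ((M ++ [y]).length : Int) - 1 = (M.length : Int) := by
        simp
      rw [hm, PySem.List.pyRange_neg_one_cons (by omega), List.foldl_cons]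
      have hy : PySem.List.pyGetD (M ++ [y]) ((M.length : Int)) 0 = y := by
        rw [PySem.List.pyGetD_eq_getElem (M ++ [y]) 0 (by omega) (by simp)]
        simp
      have hcongr :
          (PySem.List.pyRange ((M.length : Int) - 1) (-1) (-1)).foldl
              (fun (s : Int × Nat) i => (s.1 + 3 ^ s.2 * PySem.List.pyGetD (M ++ [y]) i 0, s.2 + 1))
              (a + 3 ^ k * PySem.List.pyGetD (M ++ [y]) ((M.length : Int)) 0, k + 1)
            = (PySem.List.pyRange ((M.length : Int) - 1) (-1) (-1)).foldl
              (fun (s : Int × Nat) i => (s.1 + 3 ^ s.2 * PySem.List.pyGetD M i 0, s.2 + 1))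
              (a + 3 ^ k * PySem.List.pyGetD (M ++ [y]) ((M.length : Int)) 0, k + 1) := by
        apply PySem.List.foldl_congr_mem
        intro acc x hx
        have hx' := (PySem.List.mem_pyRange_neg_one).1 hx
        have h0 : 0 ≤ x := by omega
        have h1 : x < (M.length : Int) := by omega
        have h2 : x < (((M ++ [y]).length : Nat) : Int) := by simp; omega
        rw [PySem.List.pyGetD_eq_getElem (M ++ [y]) 0 h0 h2,
            PySem.List.pyGetD_eq_getElem M 0 h0 h1]
        congr 1
        rw [List.getElem_append_left]
      rw [hcongr, ih, hy]
      simp [triVal_alt, List.foldl_append]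
      ring

-- ===== VERDICT (by name: the statement is the Claim_ definition above) =====
theorem triVal_spec : Claim_equal_triVal := by
  intro lst _
  show triVal lst = triVal_alt lst
  rw [triVal, triVal_loop lst 0 0]
  simp
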